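-- pv_equiv track=rewrite | github.com/Herboze/algo_clone | lab3/task3/src/Solution.py | function
-- ===== SOURCE A (Python) =====
-- def function(n, k, sizes):
--     groups = [[] for _ in range(k)]
--     for i in range(n):
--         groups[i % k].append(sizes[i])
--
--     for group in groups:
--         group.sort()
--
--     sorted_sizes = []
--     for i in range(n):
--         sorted_sizes.append(groups[i % k][i // k])
--
--     for i in range(1, n):
--         if sorted_sizes[i] < sorted_sizes[i - 1]:
--             return "НЕТ"
--     return "ДА"
-- ===== SOURCE B (Python) =====
-- def function(n, k, sizes):
--     m = max(0, n)
--     pref = sizes[:m]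
--     t = sorted(pref)
--     for g in range(k):
--         if sorted([pref[i] for i in range(g, m, k)]) != [t[i] for i in range(g, m, k)]:
--             return "НЕТ"
--     return "ДА"
-- ===== Notes on version B (the rewrite author's own statement) =====
-- stated objective: simpler
-- what changed: B replaces A's group-build (append by i%k), per-group sort, reinterleave via groups[i%k][i//k] and adjacency scan by one global sort of the prefix plus a per-residue-class comparison of the sorted class slice against the corresponding slice of the globally sorted array; no reinterleaved array is built.
import Mathlib
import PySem

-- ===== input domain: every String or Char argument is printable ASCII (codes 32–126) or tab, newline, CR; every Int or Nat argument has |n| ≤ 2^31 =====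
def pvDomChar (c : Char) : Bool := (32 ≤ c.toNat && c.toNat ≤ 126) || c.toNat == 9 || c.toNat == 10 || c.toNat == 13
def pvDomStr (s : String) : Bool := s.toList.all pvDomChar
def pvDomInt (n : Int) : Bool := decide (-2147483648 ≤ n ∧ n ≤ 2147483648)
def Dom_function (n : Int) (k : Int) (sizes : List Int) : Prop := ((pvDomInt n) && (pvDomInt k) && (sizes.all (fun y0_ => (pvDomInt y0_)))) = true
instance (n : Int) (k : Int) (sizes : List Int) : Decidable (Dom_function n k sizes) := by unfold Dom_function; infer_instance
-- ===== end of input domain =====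

-- B replaces A's group-build + per-group sort + reinterleave + adjacency scan by one global
-- sort plus a per-residue-class comparison of sorted class slices (objective: simpler).


-- ===== PORT A =====
def function (n : Int) (k : Int) (sizes : List Int) : String :=
  -- groups = [[] for _ in range(k)]
  let groups0 : List (List Int) := (PySem.List.pyRange 0 k 1).map (fun _ => ([] : List Int))
  -- for i in range(n): groups[i % k].append(sizes[i])
  let groups1 : List (List Int) := (PySem.List.pyRange 0 n 1).foldl
    (fun gs i =>
      PySem.List.pySetD gs (PySem.Int.mod i k)
        ((PySem.List.pyGetD gs (PySem.Int.mod i k) []) ++ [PySem.List.pyGetD sizes i 0]))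
    groups0
  -- for group in groups: group.sort()
  let groups2 : List (List Int) := groups1.map (fun g => PySem.List.sorted g (fun x => x))
  -- sorted_sizes = []; for i in range(n): sorted_sizes.append(groups[i % k][i // k])
  let ss : List Int := (PySem.List.pyRange 0 n 1).foldl
    (fun acc i =>
      acc ++ [PySem.List.pyGetD (PySem.List.pyGetD groups2 (PySem.Int.mod i k) [])
                (PySem.Int.floordiv i k) 0])
    []
  -- for i in range(1, n): if sorted_sizes[i] < sorted_sizes[i-1]: return "НЕТ"
  let bad : Bool := (PySem.List.pyRange 1 n 1).foldl
    (fun ok i => if PySem.List.pyGetD ss i 0 < PySem.List.pyGetD ss (i - 1) 0 then true else ok)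
    false
  if bad then "НЕТ" else "ДА"

-- ===== PORT B =====
def function_alt (n : Int) (k : Int) (sizes : List Int) : String :=
  -- m = max(0, n); pref = sizes[:m]; t = sorted(pref)
  let m : Int := max 0 n
  let pref : List Int := PySem.List.slice sizes none (some m)
  let t : List Int := PySem.List.sorted pref (fun x => x)
  -- for g in range(k): if sorted([pref[i] for i in range(g,m,k)]) != [t[i] for i in range(g,m,k)]: return "НЕТ"
  let bad : Bool := (PySem.List.pyRange 0 k 1).foldl
    (fun ok g =>
      if PySem.List.sorted ((PySem.List.pyRange g m k).map (fun i => PySem.List.pyGetD pref i 0)) (fun x => x)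
           ≠ (PySem.List.pyRange g m k).map (fun i => PySem.List.pyGetD t i 0)
      then true else ok)
    false
  if bad then "НЕТ" else "ДА"

-- ===== PRECONDITION & SPEC =====
-- Pre_ excludes exactly the inputs on which A raises: n > 0 with k ≤ 0 (ZeroDivisionError /
-- IndexError at i % k) or with n > len(sizes) (IndexError at sizes[i]).
def Pre_function (n : Int) (k : Int) (sizes : List Int) : Prop :=
  n ≤ 0 ∨ (1 ≤ k ∧ n ≤ (sizes.length : Int))
instance (n : Int) (k : Int) (sizes : List Int) : Decidable (Pre_function n k sizes) := by
  unfold Pre_function; infer_instance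
def pvWitness_function : Int × Int × List Int := (4, 2, [3, 1, 2, 4])

def Spec_function (n : Int) (k : Int) (sizes : List Int) (out : String) : Prop := out = function_alt n k sizes
instance (n : Int) (k : Int) (sizes : List Int) (out : String) : Decidable (Spec_function n k sizes out) := by unfold Spec_function; infer_instance

-- ===== CLAIM (what is proved, stated in full; the proofs are below) =====
def Claim_equal_function : Prop := ∀ (n : Int) (k : Int) (sizes : List Int), Dom_function n k sizes → Pre_function n k sizes → Spec_function n k sizes (function n k sizes)

-- ===== LEMMAS AND PROOFS =====

-- the values of xs at the indices ≡ g (mod K), in index order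
def strideL (K : Nat) (xs : List Int) (g : Nat) : List Int :=
  ((List.range xs.length).filter (fun i => i % K = g)).map (fun i => xs.getD i 0)

-- number of i < m with i % K = g  (g < K)
def pvCnt (K m g : Nat) : Nat := m / K + if g < m % K then 1 else 0

theorem pvCnt_succ (K g m : Nat) (hK : 0 < K) (hg : g < K) :
    pvCnt K (m+1) g = pvCnt K m g + (if m % K = g then 1 else 0) := by
  obtain ⟨q, r, hr, hm⟩ : ∃ q r, r < K ∧ m = r + K * q :=
    ⟨m / K, m % K, Nat.mod_lt _ hK, (Nat.mod_add_div m K).symm⟩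
  have hdiv : m / K = q := by
    rw [hm, Nat.add_mul_div_left _ _ hK, Nat.div_eq_of_lt hr, Nat.zero_add]
  have hmod : m % K = r := by
    rw [hm, Nat.add_mul_mod_self_left, Nat.mod_eq_of_lt hr]
  rcases Nat.lt_or_ge (r+1) K with h1 | h1
  · have hm1 : m + 1 = (r+1) + K * q := by omega
    have hdiv1 : (m+1) / K = q := by
      rw [hm1, Nat.add_mul_div_left _ _ hK, Nat.div_eq_of_lt h1, Nat.zero_add]
    have hmod1 : (m+1) % K = r + 1 := by
      rw [hm1, Nat.add_mul_mod_self_left, Nat.mod_eq_of_lt h1]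
    simp only [pvCnt, hdiv, hmod, hdiv1, hmod1]
    split_ifs <;> omega
  · have hrK : r + 1 = K := by omega
    have hmul : K * (q + 1) = K * q + K := by ring
    have hm1 : m + 1 = 0 + K * (q + 1) := by omega
    have hdiv1 : (m+1) / K = q + 1 := by
      rw [hm1, Nat.add_mul_div_left _ _ hK, Nat.zero_div, Nat.zero_add]
    have hmod1 : (m+1) % K = 0 := by
      rw [hm1, Nat.add_mul_mod_self_left, Nat.zero_mod]
    simp only [pvCnt, hdiv, hmod, hdiv1, hmod1]
    split_ifs <;> omega

theorem filter_range_mod (K g : Nat) (hK : 0 < K) (hg : g < K) (m : Nat) :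
    (List.range m).filter (fun i => decide (i % K = g)) =
      (List.range (pvCnt K m g)).map (fun q => q * K + g) := by
  induction m with
  | zero => simp [pvCnt]
  | succ m ih =>
    rw [List.range_succ, List.filter_append, ih, pvCnt_succ K g m hK hg]
    by_cases h : m % K = g
    · have hc : pvCnt K m g = m / K := by simp [pvCnt, h]
      have hmul : m / K * K = K * (m / K) := Nat.mul_comm _ _
      have hdm := Nat.div_add_mod m K
      have hval : pvCnt K m g * K + g = m := by rw [hc]; omega
      rw [if_pos h, List.range_succ, List.map_append]
      simp [h, hval]
    · simp [h]

theorem strideL_eq_map (K : Nat) (xs : List Int) (g : Nat) (hK : 0 < K) (hg : g < K) :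
    strideL K xs g =
      (List.range (pvCnt K xs.length g)).map (fun q => xs.getD (q * K + g) 0) := by
  unfold strideL
  rw [filter_range_mod K g hK hg, List.map_map]
  rfl

theorem length_strideL (K : Nat) (xs : List Int) (g : Nat) (hK : 0 < K) (hg : g < K) :
    (strideL K xs g).length = pvCnt K xs.length g := by
  rw [strideL_eq_map K xs g hK hg]
  simp

theorem map_range_getD (l : List Int) :
    (List.range l.length).map (fun i => l.getD i 0) = l := by
  apply List.ext_getElem
  · simp
  · intro i h1 h2
    simp [List.getElem?_eq_getElem h2]

theorem idx_div_lt_pvCnt (K m i : Nat) (hK : 0 < K) (hi : i < m) :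
    i / K < pvCnt K m (i % K) := by
  have h1 := Nat.div_add_mod i K
  have h2 := Nat.div_add_mod m K
  have hiK := Nat.mod_lt i hK
  have hmK := Nat.mod_lt m hK
  unfold pvCnt
  split_ifs with h
  · by_contra hc
    push_neg at hc
    have hK1 : K * (m / K + 1) ≤ K * (i / K) := Nat.mul_le_mul_left K (by omega)
    have hexp : K * (m / K + 1) = K * (m / K) + K := by ring
    omega
  · by_contra hc
    push_neg at hc
    have hK1 : K * (m / K) ≤ K * (i / K) := Nat.mul_le_mul_left K (by omega)
    omega

theorem getD_eq_strideL (K : Nat) (xs : List Int) (i : Nat) (hK : 0 < K) (hi : i < xs.length) :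
    xs.getD i 0 = (strideL K xs (i % K)).getD (i / K) 0 := by
  rw [strideL_eq_map K xs (i % K) hK (Nat.mod_lt i hK)]
  have hlt := idx_div_lt_pvCnt K xs.length i hK hi
  have hidx : i / K * K + i % K = i := by
    have := Nat.div_add_mod i K
    have hmul : i / K * K = K * (i / K) := Nat.mul_comm _ _
    omega
  have hlen : i / K < ((List.range (pvCnt K xs.length (i % K))).map
      (fun q => xs.getD (q * K + (i % K)) 0)).length := by
    simpa using hlt
  rw [List.getD_eq_getElem _ _ hlen]
  simp only [List.getElem_map, List.getElem_range]
  rw [hidx]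

theorem eq_of_strideL_eq (K : Nat) (xs ys : List Int) (hK : 0 < K)
    (hlen : xs.length = ys.length) (h : ∀ g, g < K → strideL K xs g = strideL K ys g) :
    xs = ys := by
  apply List.ext_getElem hlen
  intro i h1 h2
  rw [← List.getD_eq_getElem xs 0 h1, ← List.getD_eq_getElem ys 0 h2]
  rw [getD_eq_strideL K xs i hK h1, getD_eq_strideL K ys i hK h2,
    h (i % K) (Nat.mod_lt i hK)]

theorem sum_countP_mod (K : Nat) (hK : 0 < K) (p : Nat → Bool) (l : List Nat) :
    (∑ g ∈ Finset.range K, l.countP (fun i => p i && decide (i % K = g))) = l.countP p := by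
  induction l with
  | nil => simp
  | cons x l ih =>
    simp only [List.countP_cons]
    rw [Finset.sum_add_distrib, ih]
    by_cases hp : p x = true
    · have hs : (∑ g ∈ Finset.range K, if (p x && decide (x % K = g)) = true then 1 else 0)
          = (1 : Nat) := by
        have : ∀ g ∈ Finset.range K,
            (if (p x && decide (x % K = g)) = true then (1:Nat) else 0)
              = (if g = x % K then 1 else 0) := by
          intro g _
          simp [hp, eq_comm]
        rw [Finset.sum_congr rfl this, Finset.sum_ite_eq' (Finset.range K) (x % K) (fun _ => 1)]
        simp [Finset.mem_range, Nat.mod_lt x hK]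
      rw [hs]
      simp [hp]
    · have hs : (∑ g ∈ Finset.range K, if (p x && decide (x % K = g)) = true then 1 else 0)
          = (0 : Nat) := by
        apply Finset.sum_eq_zero
        intro g _
        simp [hp]
      rw [hs]
      simp [hp]

theorem count_eq_sum_strideL (K : Nat) (xs : List Int) (v : Int) (hK : 0 < K) :
    xs.count v = ∑ g ∈ Finset.range K, (strideL K xs g).count v := by
  have hrhs : ∀ g, (strideL K xs g).count v
      = (List.range xs.length).countP (fun i => (xs.getD i 0 == v) && decide (i % K = g)) := by
    intro g
    unfold strideL
    rw [List.count_eq_countP, List.countP_map, List.countP_filter]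
    rfl
  conv_lhs => rw [← map_range_getD xs]
  rw [List.count_eq_countP, List.countP_map]
  rw [Finset.sum_congr rfl (fun g _ => hrhs g)]
  rw [sum_countP_mod K hK]
  rfl

theorem perm_of_strideL_perm (K : Nat) (xs ys : List Int) (hK : 0 < K)
    (h : ∀ g, g < K → (strideL K xs g).Perm (strideL K ys g)) : xs.Perm ys := by
  rw [List.perm_iff_count]
  intro v
  rw [count_eq_sum_strideL K xs v hK, count_eq_sum_strideL K ys v hK]
  apply Finset.sum_congr rfl
  intro g hg
  exact (h g (Finset.mem_range.mp hg)).count_eq v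

-- ceiling-count arithmetic for B's range(g, m, K)
theorem nat_ceil_count (K m g : Nat) (hK : 0 < K) (hg : g < K) (hgm : g < m) :
    (m - g + K - 1) / K = pvCnt K m g := by
  obtain ⟨q, r, hr, hm⟩ : ∃ q r, r < K ∧ m = r + K * q :=
    ⟨m / K, m % K, Nat.mod_lt _ hK, (Nat.mod_add_div m K).symm⟩
  have hdiv : m / K = q := by
    rw [hm, Nat.add_mul_div_left _ _ hK, Nat.div_eq_of_lt hr, Nat.zero_add]
  have hmod : m % K = r := by
    rw [hm, Nat.add_mul_mod_self_left, Nat.mod_eq_of_lt hr]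
  unfold pvCnt
  rw [hdiv, hmod]
  by_cases hgr : g < r
  · have hx : m - g + K - 1 = (r - g - 1) + K * (q + 1) := by
      have e : K*(q+1) = K*q + K := by ring
      omega
    rw [if_pos hgr, hx, Nat.add_mul_div_left _ _ hK, Nat.div_eq_of_lt (by omega)]
    omega
  · have hx : m - g + K - 1 = (r + K - 1 - g) + K * q := by omega
    rw [if_neg hgr, hx, Nat.add_mul_div_left _ _ hK, Nat.div_eq_of_lt (by omega)]
    omega

theorem ceil_count_eq_pvCnt (K m g : Nat) (hK : 0 < K) (hg : g < K) :
    (if (g : Int) < (m : Int) then (((m : Int) - g + (K : Int) - 1) / K).toNat else 0)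
      = pvCnt K m g := by
  by_cases hgm : g < m
  · rw [if_pos (by exact_mod_cast hgm)]
    have hcast : (m : Int) - g + (K : Int) - 1 = ((m - g + K - 1 : Nat) : Int) := by omega
    have hdivc : ((m - g + K - 1 : Nat) : Int) / (K : Int) = (((m - g + K - 1) / K : Nat) : Int) := by
      push_cast; ring
    rw [hcast, hdivc, Int.toNat_natCast]
    exact nat_ceil_count K m g hK hg hgm
  · rw [if_neg (by exact_mod_cast hgm)]
    have h1 : m ≤ g := by omega
    have h2 : m < K := by omega
    simp [pvCnt, Nat.div_eq_of_lt h2, Nat.mod_eq_of_lt h2]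
    omega

-- B's per-class slice of any list of length m equals strideL
theorem pyRange_map_getD (K m g : Nat) (xs : List Int) (hK : 0 < K) (hg : g < K)
    (hlen : xs.length = m) :
    (PySem.List.pyRange (g : Int) (m : Int) (K : Int)).map (fun i => PySem.List.pyGetD xs i 0) =
      strideL K xs g := by
  rw [PySem.List.pyRange_of_pos (g : Int) (m : Int) (show (0:Int) < (K : Int) by exact_mod_cast hK),
    List.map_map, ceil_count_eq_pvCnt K m g hK hg, strideL_eq_map K xs g hK hg, hlen]
  apply List.map_congr_left
  intro q _
  have hc1 : (g : Int) + (K : Int) * (q : Int) = ((q * K + g : Nat) : Int) := by push_cast; ring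
  show PySem.List.pyGetD xs ((g : Int) + (K : Int) * (q : Int)) 0 = xs.getD (q * K + g) 0
  rw [hc1, PySem.List.pyGetD_natCast]

-- index bound: q < pvCnt K m g → q*K + g < m
theorem idx_lt_of_lt_pvCnt (K m g q : Nat) (hK : 0 < K) (hg : g < K)
    (hq : q < pvCnt K m g) : q * K + g < m := by
  obtain ⟨q', r, hr, hm⟩ : ∃ q' r, r < K ∧ m = r + K * q' :=
    ⟨m / K, m % K, Nat.mod_lt _ hK, (Nat.mod_add_div m K).symm⟩
  have hdiv : m / K = q' := by
    rw [hm, Nat.add_mul_div_left _ _ hK, Nat.div_eq_of_lt hr, Nat.zero_add]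
  have hmod : m % K = r := by
    rw [hm, Nat.add_mul_mod_self_left, Nat.mod_eq_of_lt hr]
  unfold pvCnt at hq
  rw [hdiv, hmod] at hq
  by_cases hgr : g < r
  · rw [if_pos hgr] at hq
    have hq' : q ≤ q' := by omega
    have := Nat.mul_le_mul_right K hq'
    have e2 : K*q' = q'*K := by ring
    omega
  · rw [if_neg hgr] at hq
    have hq' : q + 1 ≤ q' := by omega
    have := Nat.mul_le_mul_right K hq'
    have e1 : (q+1)*K = q*K + K := by ring
    have e2 : K*q' = q'*K := by ring
    omega

-- residue/quotient of q*K + g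
theorem mod_mul_add (K g q : Nat) (hg : g < K) : (q * K + g) % K = g := by
  have h : q * K + g = g + K * q := by ring
  rw [h, Nat.add_mul_mod_self_left, Nat.mod_eq_of_lt hg]
theorem div_mul_add (K g q : Nat) (hK : 0 < K) (hg : g < K) : (q * K + g) / K = q := by
  have h : q * K + g = g + K * q := by ring
  rw [h, Nat.add_mul_div_left _ _ hK, Nat.div_eq_of_lt hg, Nat.zero_add]

-- stride of an interleaved map:  strideL of (range m).map (fun i => f (i%K) (i/K)) at g
-- equals (range (pvCnt K m g)).map (fun q => f g q)
theorem strideL_interleave (K m g : Nat) (f : Nat → Nat → Int) (hK : 0 < K) (hg : g < K) :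
    strideL K ((List.range m).map (fun i => f (i % K) (i / K))) g =
      (List.range (pvCnt K m g)).map (fun q => f g q) := by
  have hlen : ((List.range m).map (fun i => f (i % K) (i / K))).length = m := by simp
  rw [strideL_eq_map K _ g hK hg, hlen]
  apply List.map_congr_left
  intro q hq
  have hqlt : q < pvCnt K m g := by simpa using hq
  have hidx : q * K + g < m := idx_lt_of_lt_pvCnt K m g q hK hg hqlt
  rw [List.getD_eq_getElem _ _ (by simpa using hidx)]
  simp only [List.getElem_map, List.getElem_range]
  rw [mod_mul_add K g q hg, div_mul_add K g q hK hg]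

-- one iteration of A's group-filling loop
theorem A_step (k : Int) (sizes : List Int) (K : Nat) (hk : (K : Int) = k) (hK : 0 < K)
    (R : List (List Int)) (hlen : R.length = K) (j : Nat) :
    (PySem.List.pySetD R (PySem.Int.mod (j : Int) k)
      ((PySem.List.pyGetD R (PySem.Int.mod (j : Int) k) []) ++ [PySem.List.pyGetD sizes (j : Int) 0])).length = K ∧
    ∀ g : Nat, g < K →
      (PySem.List.pySetD R (PySem.Int.mod (j : Int) k)
        ((PySem.List.pyGetD R (PySem.Int.mod (j : Int) k) []) ++ [PySem.List.pyGetD sizes (j : Int) 0])).getD g []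
      = R.getD g [] ++ (if j % K = g then [sizes.getD j 0] else []) := by
  have hmod : PySem.Int.mod (j : Int) k = ((j % K : Nat) : Int) := by
    rw [← hk, PySem.Int.mod_natCast]
  have hjK : j % K < R.length := by rw [hlen]; exact Nat.mod_lt j hK
  constructor
  · rw [PySem.List.length_pySetD, hlen]
  · intro g hg
    rw [hmod]
    have h1 := (PySem.List.pyGetD_natCast
      (PySem.List.pySetD R ((j % K : Nat) : Int)
        ((PySem.List.pyGetD R ((j % K : Nat) : Int) []) ++ [PySem.List.pyGetD sizes (j : Int) 0]))
      g []).symm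
    rw [h1, PySem.List.pyGetD_pySetD_natCast _ _ _ _ _ hjK]
    by_cases hgj : g = j % K
    · rw [if_pos hgj, if_pos hgj.symm, hgj,
        PySem.List.pyGetD_natCast R, PySem.List.pyGetD_natCast sizes]
    · rw [if_neg hgj, if_neg (fun h => hgj h.symm),
        PySem.List.pyGetD_natCast R, List.append_nil]

-- A's group-filling loop, characterised
theorem A_groups (k : Int) (sizes : List Int) (K : Nat) (hk : (K : Int) = k) (hK : 0 < K)
    (j : Nat) :
    ∀ (gs : List (List Int)), gs.length = K →
      (((PySem.List.pyRange 0 (j : Int) 1).foldl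
          (fun gs i => PySem.List.pySetD gs (PySem.Int.mod i k)
            ((PySem.List.pyGetD gs (PySem.Int.mod i k) []) ++ [PySem.List.pyGetD sizes i 0]))
          gs).length = K ∧
       ∀ g : Nat, g < K →
        ((PySem.List.pyRange 0 (j : Int) 1).foldl
          (fun gs i => PySem.List.pySetD gs (PySem.Int.mod i k)
            ((PySem.List.pyGetD gs (PySem.Int.mod i k) []) ++ [PySem.List.pyGetD sizes i 0]))
          gs).getD g []
          = gs.getD g [] ++ ((List.range j).filter (fun i => i % K = g)).map (fun i => sizes.getD i 0)) := by
  induction j with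
  | zero => intro gs hgs; simp [hgs, PySem.List.pyRange_one_eq_nil (le_refl (0 : Int))]
  | succ j ih =>
    intro gs hgs
    have hc : ((j+1 : Nat) : Int) = (j : Int) + 1 := by push_cast; ring
    rw [hc, PySem.List.pyRange_one_succ_right (Int.natCast_nonneg j), List.foldl_append]
    simp only [List.foldl_cons, List.foldl_nil]
    obtain ⟨hlen, hdesc⟩ := ih gs hgs
    obtain ⟨hslen, hsdesc⟩ := A_step k sizes K hk hK _ hlen j
    refine ⟨hslen, ?_⟩
    intro g hg
    rw [hsdesc g hg, hdesc g hg, List.range_succ, List.filter_append, List.map_append,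
      List.append_assoc]
    congr 2
    by_cases h : j % K = g
    · simp [h]
    · simp [h]

-- strideL of a take-prefix, written over the original list
theorem strideL_take (K m : Nat) (sizes : List Int) (hmlen : m ≤ sizes.length) (g : Nat) :
    strideL K (sizes.take m) g
      = ((List.range m).filter (fun i => i % K = g)).map (fun i => sizes.getD i 0) := by
  unfold strideL
  have hl : (sizes.take m).length = m := by rw [List.length_take]; omega
  rw [hl]
  apply List.map_congr_left
  intro i hi
  have him : i < m := by
    have := List.mem_filter.mp hi
    exact List.mem_range.mp this.1
  have h1 : i < (sizes.take m).length := by omega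
  have h2 : i < sizes.length := by omega
  rw [List.getD_eq_getElem _ _ h1, List.getD_eq_getElem _ _ h2, List.getElem_take]

-- the core mathematical equivalence
theorem core_iff (K m : Nat) (pref : List Int) (hK : 0 < K) (hpl : pref.length = m) :
    List.Pairwise (· ≤ ·) ((List.range m).map (fun i =>
        ((PySem.List.sorted (strideL K pref (i % K)) (fun x => x)).getD (i / K) 0)))
      ↔ ∀ g, g < K → PySem.List.sorted (strideL K pref g) (fun x => x)
          = strideL K (PySem.List.sorted pref (fun x => x)) g := by
  have htlen : (PySem.List.sorted pref (fun x : Int => x)).length = m := by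
    rw [PySem.List.length_sorted, hpl]
  have hsslen : ((List.range m).map (fun i =>
      ((PySem.List.sorted (strideL K pref (i % K)) (fun x => x)).getD (i / K) 0))).length = m := by
    simp
  have hstride : ∀ g, g < K →
      strideL K ((List.range m).map (fun i =>
        ((PySem.List.sorted (strideL K pref (i % K)) (fun x => x)).getD (i / K) 0))) g
      = PySem.List.sorted (strideL K pref g) (fun x => x) := by
    intro g hg
    rw [strideL_interleave K m g (fun r q => (PySem.List.sorted (strideL K pref r) (fun x => x)).getD q 0) hK hg]
    have hglen : (PySem.List.sorted (strideL K pref g) (fun x : Int => x)).length = pvCnt K m g := by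
      rw [PySem.List.length_sorted, length_strideL K pref g hK hg, hpl]
    rw [← hglen]
    exact map_range_getD _
  constructor
  · intro hpair g hg
    have hperm : ((List.range m).map (fun i =>
        ((PySem.List.sorted (strideL K pref (i % K)) (fun x => x)).getD (i / K) 0))).Perm pref := by
      apply perm_of_strideL_perm K _ pref hK
      intro g' hg'
      rw [hstride g' hg']
      exact PySem.List.sorted_perm (strideL K pref g') (fun x => x) false
    have hts : PySem.List.sorted pref (fun x : Int => x)
        = (List.range m).map (fun i =>
            ((PySem.List.sorted (strideL K pref (i % K)) (fun x => x)).getD (i / K) 0)) :=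
      PySem.List.sorted_id_eq_of_perm_of_pairwise pref _ hperm hpair
    rw [← hstride g hg, ← hts]
  · intro hall
    have hss_t : ((List.range m).map (fun i =>
        ((PySem.List.sorted (strideL K pref (i % K)) (fun x => x)).getD (i / K) 0)))
        = PySem.List.sorted pref (fun x : Int => x) := by
      apply eq_of_strideL_eq K _ _ hK (by rw [hsslen, htlen])
      intro g hg
      rw [hstride g hg, hall g hg]
    rw [hss_t]
    have h := PySem.List.sorted_pairwise pref (fun x : Int => x)
    simpa using h

-- named pieces of A's pipeline (proof-side abbreviations; defeq to the port's lets)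
def AG1 (n k : Int) (sizes : List Int) : List (List Int) :=
  (PySem.List.pyRange 0 n 1).foldl
    (fun gs i => PySem.List.pySetD gs (PySem.Int.mod i k)
      ((PySem.List.pyGetD gs (PySem.Int.mod i k) []) ++ [PySem.List.pyGetD sizes i 0]))
    ((PySem.List.pyRange 0 k 1).map (fun _ => ([] : List Int)))
def AG2 (n k : Int) (sizes : List Int) : List (List Int) :=
  (AG1 n k sizes).map (fun g => PySem.List.sorted g (fun x => x))
def ASS (n k : Int) (sizes : List Int) : List Int :=
  (PySem.List.pyRange 0 n 1).foldl
    (fun acc i => acc ++ [PySem.List.pyGetD (PySem.List.pyGetD (AG2 n k sizes) (PySem.Int.mod i k) [])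
      (PySem.Int.floordiv i k) 0]) []

theorem function_unfold (n k : Int) (sizes : List Int) :
    function n k sizes =
      if (PySem.List.pyRange 1 n 1).foldl
          (fun ok i => if PySem.List.pyGetD (ASS n k sizes) i 0
              < PySem.List.pyGetD (ASS n k sizes) (i - 1) 0 then true else ok) false
      then "НЕТ" else "ДА" := rfl

-- named pieces of B's pipeline
def BPref (n : Int) (sizes : List Int) : List Int :=
  PySem.List.slice sizes none (some (max 0 n))
def BT (n : Int) (sizes : List Int) : List Int :=
  PySem.List.sorted (BPref n sizes) (fun x => x)

theorem function_alt_unfold (n k : Int) (sizes : List Int) :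
    function_alt n k sizes =
      if (PySem.List.pyRange 0 k 1).foldl
          (fun ok g =>
            if PySem.List.sorted ((PySem.List.pyRange g (max 0 n) k).map
                  (fun i => PySem.List.pyGetD (BPref n sizes) i 0)) (fun x => x)
                ≠ (PySem.List.pyRange g (max 0 n) k).map
                  (fun i => PySem.List.pyGetD (BT n sizes) i 0)
            then true else ok) false
      then "НЕТ" else "ДА" := rfl

-- the starting list of empty groups
theorem groups0_len (K : Nat) :
    ((PySem.List.pyRange 0 (K : Int) 1).map (fun _ => ([] : List Int))).length = K := by
  simp [PySem.List.length_pyRange_one]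
theorem groups0_getD (K g : Nat) (hg : g < K) :
    ((PySem.List.pyRange 0 (K : Int) 1).map (fun _ => ([] : List Int))).getD g [] = [] := by
  rw [List.getD_eq_getElem _ _ (by rw [groups0_len]; exact hg)]
  simp

-- A's filled groups, in stride form
theorem AG1_char (K m : Nat) (sizes : List Int) (hK : 0 < K) (hmlen : m ≤ sizes.length) :
    (AG1 ((m : Nat) : Int) ((K : Nat) : Int) sizes).length = K ∧
    ∀ g : Nat, g < K →
      (AG1 ((m : Nat) : Int) ((K : Nat) : Int) sizes).getD g []
        = strideL K (sizes.take m) g := by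
  obtain ⟨h1, h2⟩ := A_groups ((K : Nat) : Int) sizes K rfl hK m
    ((PySem.List.pyRange 0 (K : Int) 1).map (fun _ => ([] : List Int))) (groups0_len K)
  refine ⟨h1, ?_⟩
  intro g hg
  rw [show AG1 ((m : Nat) : Int) ((K : Nat) : Int) sizes
      = ((PySem.List.pyRange 0 ((m : Nat) : Int) 1).foldl
          (fun gs i => PySem.List.pySetD gs (PySem.Int.mod i ((K : Nat) : Int))
            ((PySem.List.pyGetD gs (PySem.Int.mod i ((K : Nat) : Int)) [])
              ++ [PySem.List.pyGetD sizes i 0]))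
          ((PySem.List.pyRange 0 (K : Int) 1).map (fun _ => ([] : List Int)))) from rfl,
    h2 g hg, groups0_getD K g hg, List.nil_append, strideL_take K m sizes hmlen g]

-- helper: getD of a mapped list at an in-range index
theorem getD_map_lt (f : List Int → List Int) (l : List (List Int)) (nn : Nat)
    (h : nn < l.length) : (l.map f).getD nn [] = f (l.getD nn []) := by
  rw [List.getD_eq_getElem _ _ (by simpa using h), List.getElem_map,
    List.getD_eq_getElem _ _ h]

-- A's reinterleaved array, in stride form
theorem ASS_char (K m : Nat) (sizes : List Int) (hK : 0 < K) (hmlen : m ≤ sizes.length) :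
    ASS ((m : Nat) : Int) ((K : Nat) : Int) sizes
      = (List.range m).map (fun i =>
          ((PySem.List.sorted (strideL K (sizes.take m) (i % K)) (fun x => x)).getD (i / K) 0)) := by
  obtain ⟨hlen, hdesc⟩ := AG1_char K m sizes hK hmlen
  unfold ASS
  rw [PySem.List.foldl_append_singleton_eq_map, List.nil_append,
    PySem.List.pyRange_zero_nat, List.map_map]
  apply List.map_congr_left
  intro i hi
  have him : i < m := List.mem_range.mp hi
  simp only [Function.comp_apply]
  rw [show PySem.Int.mod ((i : Nat) : Int) ((K : Nat) : Int) = ((i % K : Nat) : Int)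
      from PySem.Int.mod_natCast i K,
    show PySem.Int.floordiv ((i : Nat) : Int) ((K : Nat) : Int) = ((i / K : Nat) : Int)
      from PySem.Int.floordiv_natCast i K,
    PySem.List.pyGetD_natCast, PySem.List.pyGetD_natCast]
  unfold AG2
  rw [getD_map_lt _ _ _ (by rw [hlen]; exact Nat.mod_lt i hK),
    hdesc (i % K) (Nat.mod_lt i hK)]

-- A's verdict under the main-case hypotheses
theorem A_char (n k : Int) (sizes : List Int) (K m : Nat)
    (hkK : ((K : Nat) : Int) = k) (hK : 0 < K) (hmn : ((m : Nat) : Int) = n)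
    (hmlen : m ≤ sizes.length) :
    function n k sizes =
      if List.Pairwise (· ≤ ·) ((List.range m).map (fun i =>
          ((PySem.List.sorted (strideL K (sizes.take m) (i % K)) (fun x => x)).getD (i / K) 0)))
      then "ДА" else "НЕТ" := by
  rw [function_unfold]
  simp only [← hmn, ← hkK, ASS_char K m sizes hK hmlen]
  rw [PySem.List.foldl_ite_true_eq, Bool.false_or]
  have hlenSS : ((List.range m).map (fun i =>
      ((PySem.List.sorted (strideL K (sizes.take m) (i % K)) (fun x => x)).getD (i / K) 0))).length
      = m := by simp
  have hiff : ((PySem.List.pyRange 1 ((m : Nat) : Int) 1).any (fun i =>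
      decide (PySem.List.pyGetD ((List.range m).map (fun i =>
          ((PySem.List.sorted (strideL K (sizes.take m) (i % K)) (fun x => x)).getD (i / K) 0))) i 0
        < PySem.List.pyGetD ((List.range m).map (fun i =>
          ((PySem.List.sorted (strideL K (sizes.take m) (i % K)) (fun x => x)).getD (i / K) 0))) (i - 1) 0)) = false)
      ↔ List.Pairwise (· ≤ ·) ((List.range m).map (fun i =>
          ((PySem.List.sorted (strideL K (sizes.take m) (i % K)) (fun x => x)).getD (i / K) 0))) := by
    rw [List.any_eq_false, ← List.isChain_iff_pairwise, List.isChain_iff_getElem]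
    constructor
    · intro h j hj
      have hjm : j + 1 < m := by rw [hlenSS] at hj; exact hj
      have hmem : (((j+1 : Nat) : Nat) : Int) ∈ PySem.List.pyRange 1 ((m : Nat) : Int) 1 := by
        rw [PySem.List.mem_pyRange_one]
        omega
      have h2 := h _ hmem
      rw [decide_eq_true_eq] at h2
      push_neg at h2
      have e1 : (((j+1 : Nat) : Nat) : Int) - 1 = ((j : Nat) : Int) := by push_cast; ring
      rw [e1, PySem.List.pyGetD_natCast, PySem.List.pyGetD_natCast,
        List.getD_eq_getElem _ _ (by omega : j + 1 < _),
        List.getD_eq_getElem _ _ (by omega : j < _)] at h2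
      exact h2
    · intro h i hi
      rw [PySem.List.mem_pyRange_one] at hi
      obtain ⟨hi1, hi2⟩ := hi
      have hj0 : 0 < i.toNat := by omega
      have hjm : i.toNat < m := by omega
      have hieq : ((i.toNat : Nat) : Int) = i := Int.toNat_of_nonneg (by omega)
      rw [decide_eq_true_eq]
      push_neg
      have e1 : i - 1 = ((i.toNat - 1 : Nat) : Int) := by omega
      rw [e1, ← hieq, PySem.List.pyGetD_natCast, PySem.List.pyGetD_natCast,
        List.getD_eq_getElem _ _ (by rw [hlenSS]; omega),
        List.getD_eq_getElem _ _ (by rw [hlenSS]; omega)]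
      have := h (i.toNat - 1) (by rw [hlenSS]; omega)
      have e2 : i.toNat - 1 + 1 = i.toNat := by omega
      simp only [e2] at this
      exact this
  by_cases hp : List.Pairwise (· ≤ ·) ((List.range m).map (fun i =>
      ((PySem.List.sorted (strideL K (sizes.take m) (i % K)) (fun x => x)).getD (i / K) 0)))
  · rw [if_pos hp, hiff.mpr hp]
    simp
  · rw [if_neg hp]
    have h3 := mt hiff.mp hp
    rw [Bool.not_eq_false] at h3
    rw [h3]
    simp

-- B's verdict under the main-case hypotheses
theorem B_char (n k : Int) (sizes : List Int) (K m : Nat)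
    (hkK : ((K : Nat) : Int) = k) (hK : 0 < K) (hmax : max 0 n = ((m : Nat) : Int))
    (hmlen : m ≤ sizes.length) :
    function_alt n k sizes =
      if (∀ g, g < K → PySem.List.sorted (strideL K (sizes.take m) g) (fun x => x)
            = strideL K (PySem.List.sorted (sizes.take m) (fun x => x)) g)
      then "ДА" else "НЕТ" := by
  have hpref : BPref n sizes = sizes.take m := by
    unfold BPref
    rw [hmax, PySem.List.slice_to sizes (Int.natCast_nonneg m), Int.toNat_natCast]
  have hpl : (sizes.take m).length = m := by rw [List.length_take]; omega
  have htl : (PySem.List.sorted (sizes.take m) (fun x : Int => x)).length = m := by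
    rw [PySem.List.length_sorted, hpl]
  rw [function_alt_unfold]
  simp only [hmax, ← hkK, hpref, BT]
  rw [PySem.List.foldl_ite_true_eq, Bool.false_or]
  have hiff : ((PySem.List.pyRange 0 ((K : Nat) : Int) 1).any (fun g =>
      decide (PySem.List.sorted ((PySem.List.pyRange g ((m : Nat) : Int) ((K : Nat) : Int)).map
            (fun i => PySem.List.pyGetD (sizes.take m) i 0)) (fun x => x)
          ≠ (PySem.List.pyRange g ((m : Nat) : Int) ((K : Nat) : Int)).map
            (fun i => PySem.List.pyGetD (PySem.List.sorted (sizes.take m) (fun x => x)) i 0))) = false)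
      ↔ (∀ g, g < K → PySem.List.sorted (strideL K (sizes.take m) g) (fun x => x)
            = strideL K (PySem.List.sorted (sizes.take m) (fun x => x)) g) := by
    rw [List.any_eq_false]
    constructor
    · intro h gn hgn
      have hmem : ((gn : Nat) : Int) ∈ PySem.List.pyRange 0 ((K : Nat) : Int) 1 := by
        rw [PySem.List.mem_pyRange_one]; omega
      have h2 := h _ hmem
      rw [decide_eq_true_eq] at h2
      push_neg at h2
      rw [pyRange_map_getD K m gn (sizes.take m) hK hgn hpl,
        pyRange_map_getD K m gn _ hK hgn htl] at h2
      exact h2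
    · intro hall g hg
      rw [PySem.List.mem_pyRange_one] at hg
      obtain ⟨h0, hlt⟩ := hg
      have hgeq : ((g.toNat : Nat) : Int) = g := Int.toNat_of_nonneg h0
      have hgn : g.toNat < K := by omega
      rw [decide_eq_true_eq]
      push_neg
      rw [← hgeq, pyRange_map_getD K m g.toNat (sizes.take m) hK hgn hpl,
        pyRange_map_getD K m g.toNat _ hK hgn htl]
      exact hall g.toNat hgn
  by_cases hp : (∀ g, g < K → PySem.List.sorted (strideL K (sizes.take m) g) (fun x => x)
      = strideL K (PySem.List.sorted (sizes.take m) (fun x => x)) g)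
  · rw [if_pos hp, hiff.mpr hp]
    simp
  · rw [if_neg hp]
    have h3 := mt hiff.mp hp
    rw [Bool.not_eq_false] at h3
    rw [h3]
    simp

-- the equivalence on the whole precondition
theorem function_eq_alt (n k : Int) (sizes : List Int) (hpre : Pre_function n k sizes) :
    function n k sizes = function_alt n k sizes := by
  by_cases hn : n ≤ 0
  · have hA : function n k sizes = "ДА" := by
      rw [function_unfold, PySem.List.pyRange_one_eq_nil (by omega : n ≤ 1)]
      simp
    have hB : function_alt n k sizes = "ДА" := by
      rw [function_alt_unfold]
      have hmax : max 0 n = (0 : Int) := by omega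
      simp only [hmax]
      rw [PySem.List.foldl_ite_true_eq, Bool.false_or]
      have hany : ((PySem.List.pyRange 0 k 1).any (fun g =>
          decide (PySem.List.sorted ((PySem.List.pyRange g 0 k).map
                (fun i => PySem.List.pyGetD (BPref n sizes) i 0)) (fun x => x)
              ≠ (PySem.List.pyRange g 0 k).map
                (fun i => PySem.List.pyGetD (BT n sizes) i 0)))) = false := by
        rw [List.any_eq_false]
        intro g hg
        rw [PySem.List.mem_pyRange_one] at hg
        have hr : PySem.List.pyRange g 0 k = [] := by
          rw [PySem.List.pyRange_of_pos g 0 (by omega), if_neg (by omega)]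
          simp
        simp [hr, PySem.List.sorted_eq_nil_iff]
      rw [hany]
      simp
    rw [hA, hB]
  · have hn' : 0 < n := by omega
    obtain ⟨hk1, hnlen⟩ : 1 ≤ k ∧ n ≤ (sizes.length : Int) := by
      rcases hpre with h | h
      · omega
      · exact h
    have hkK : ((k.toNat : Nat) : Int) = k := Int.toNat_of_nonneg (by omega)
    have hK : 0 < k.toNat := by omega
    have hmn : ((n.toNat : Nat) : Int) = n := Int.toNat_of_nonneg (by omega)
    have hmax : max 0 n = ((n.toNat : Nat) : Int) := by omega
    have hmlen : n.toNat ≤ sizes.length := by omega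
    rw [A_char n k sizes k.toNat n.toNat hkK hK hmn hmlen,
      B_char n k sizes k.toNat n.toNat hkK hK hmax hmlen]
    exact if_congr (core_iff k.toNat n.toNat (sizes.take n.toNat) hK
      (by rw [List.length_take]; omega)) rfl rfl

-- ===== VERDICT (by name: the statement is the Claim_ definition above) =====
theorem function_spec : Claim_equal_function := by
  intro n k sizes _ hpre
  show function n k sizes = function_alt n k sizes
  exact function_eq_alt n k sizes hpre
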